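-- pv_equiv track=rewrite | github.com/PROxZIMA/Competitive-Coding | CodeChef/STRSEQ.py | isStrict
-- ===== SOURCE A (Python) =====
-- def isStrict(n, a):
--     if a[n - 1] > a[0]:
--         for i in range(1, n):
--             if a[i] <= a[i - 1]:
--                 return 'No'
--     else:
--         for i in range(1, n):
--             if a[i] >= a[i - 1]:
--                 return 'No'
--     return 'Yes'
-- ===== SOURCE B (Python) =====
-- def isStrict(n, a):
--     inc = all(a[i] > a[i - 1] for i in range(1, n))
--     dec = all(a[i] < a[i - 1] for i in range(1, n))
--     return 'Yes' if inc or dec else 'No'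
-- ===== Notes on version B (the rewrite author's own statement) =====
-- stated objective: simpler
-- what changed: B drops A's direction-selecting branch on a[n-1] > a[0] with two early-return loops and instead computes two independent monotonicity booleans (strictly increasing, strictly decreasing) and returns 'Yes' iff either holds.
import Mathlib
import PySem

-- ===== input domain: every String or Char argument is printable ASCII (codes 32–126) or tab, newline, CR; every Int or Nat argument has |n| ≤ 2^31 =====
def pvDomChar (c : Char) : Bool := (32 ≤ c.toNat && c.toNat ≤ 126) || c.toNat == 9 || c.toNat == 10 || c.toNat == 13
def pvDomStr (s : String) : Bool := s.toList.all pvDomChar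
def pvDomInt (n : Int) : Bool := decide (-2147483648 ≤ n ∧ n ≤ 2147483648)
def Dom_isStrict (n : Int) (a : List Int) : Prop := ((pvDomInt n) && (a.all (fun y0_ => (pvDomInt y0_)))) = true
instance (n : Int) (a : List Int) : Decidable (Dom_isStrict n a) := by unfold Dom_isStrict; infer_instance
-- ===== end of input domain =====

-- B replaces A's direction-selecting branch + two early-return loops by two independent
-- monotonicity flags (simpler decomposition, same O(n) cost); return value only.

-- ===== PORT A =====
-- A's early-return for-loop over range(1, n); 'bad x y' is the comparison that returns 'No'.
-- The "" result marks a Python IndexError (those inputs are excluded by Pre_isStrict).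
def isStrictLoop (bad : Int → Int → Bool) (a : List Int) : List Int → String
  | [] => "Yes"
  | i :: rest =>
    match PySem.List.pyGet? a i, PySem.List.pyGet? a (i - 1) with
    | some x, some y => if bad x y then "No" else isStrictLoop bad a rest
    | _, _ => ""

def isStrict (n : Int) (a : List Int) : String :=
  match PySem.List.pyGet? a (n - 1), PySem.List.pyGet? a 0 with
  | some last, some first =>
    if last > first then isStrictLoop (fun x y => decide (x ≤ y)) a (PySem.List.pyRange 1 n 1)
    else isStrictLoop (fun x y => decide (x ≥ y)) a (PySem.List.pyRange 1 n 1)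
  | _, _ => ""  -- IndexError in Python

-- ===== PORT B =====
-- one comparison a[i] cmp a[i-1]; 'false' on an out-of-range index (IndexError, excluded by Pre_isStrict)
def bChk (cmp : Int → Int → Bool) (a : List Int) (i : Int) : Bool :=
  match PySem.List.pyGet? a i, PySem.List.pyGet? a (i - 1) with
  | some x, some y => cmp x y
  | _, _ => false

def isStrict_alt (n : Int) (a : List Int) : String :=
  let inc := (PySem.List.pyRange 1 n 1).all (bChk (fun x y => decide (x > y)) a)
  let dec := (PySem.List.pyRange 1 n 1).all (bChk (fun x y => decide (x < y)) a)
  if inc || dec then "Yes" else "No"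

-- ===== PRECONDITION & SPEC =====
-- Pre_ is exactly the inputs on which A returns: the natural domain 1 ≤ n ≤ len(a), plus the
-- n ≤ 0 inputs where a[n-1] wraps around (there A's loop is empty and it returns 'Yes', as does B);
-- everywhere else A raises IndexError at a[n-1] or at a loop access a[i].
def Pre_isStrict (n : Int) (a : List Int) : Prop :=
  (1 ≤ n ∧ n ≤ a.length) ∨ (n ≤ 0 ∧ 1 - a.length ≤ n)
instance (n : Int) (a : List Int) : Decidable (Pre_isStrict n a) := by unfold Pre_isStrict; infer_instance
def pvWitness_isStrict : Int × List Int := (3, [1, 2, 3])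
def Spec_isStrict (n : Int) (a : List Int) (out : String) : Prop := out = isStrict_alt n a
instance (n : Int) (a : List Int) (out : String) : Decidable (Spec_isStrict n a out) := by unfold Spec_isStrict; infer_instance

-- ===== CLAIM (what is proved, stated in full; the proofs are below) =====
def Claim_equal_isStrict : Prop := ∀ (n : Int) (a : List Int), Dom_isStrict n a → Pre_isStrict n a → Spec_isStrict n a (isStrict n a)

-- ===== LEMMAS AND PROOFS =====

-- the two comparison tests used by A's loops are the negations of B's
theorem bad_le_eq : (fun x y : Int => !decide (x ≤ y)) = (fun x y : Int => decide (x > y)) := by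
  funext x y
  by_cases h : x ≤ y
  · simp [h, not_lt.mpr h]
  · simp [h, not_le.mp h]

theorem bad_ge_eq : (fun x y : Int => !decide (x ≥ y)) = (fun x y : Int => decide (x < y)) := by
  funext x y
  by_cases h : y ≤ x
  · simp [h, not_lt.mpr h]
  · simp [h, not_le.mp h]

-- A's loop, when every index it touches is in range, is 'all' of the negated bad-test.
theorem isStrictLoop_eq_all (bad : Int → Int → Bool) (a : List Int) (l : List Int)
    (h : ∀ i ∈ l, ∃ x y, PySem.List.pyGet? a i = some x ∧ PySem.List.pyGet? a (i - 1) = some y) :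
    isStrictLoop bad a l = if l.all (bChk (fun x y => !bad x y) a) then "Yes" else "No" := by
  induction l with
  | nil => simp [isStrictLoop]
  | cons i rest ih =>
    obtain ⟨x, y, hx, hy⟩ := h i (by simp)
    have hrest := fun j hj => h j (List.mem_cons_of_mem _ hj)
    simp only [isStrictLoop, hx, hy, List.all_cons, bChk]
    by_cases hb : bad x y = true
    · simp [hb]
    · simp only [Bool.not_eq_true] at hb
      simp [hb, ih hrest]

-- a valid index gives a 'some' lookup, with value getD
theorem pyGet?_getD (a : List Int) (i : Int) (h0 : 0 ≤ i) (hl : i < (a.length : Int)) :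
    PySem.List.pyGet? a i = some (a.getD i.toNat 0) := by
  rw [PySem.List.pyGet?_of_nonneg a h0,
    List.getElem?_eq_getElem (show i.toNat < a.length by omega)]
  simp [List.getD_eq_getElem?_getD, List.getElem?_eq_getElem (show i.toNat < a.length by omega)]

-- every index of range(1, n) is in range for a when n ≤ len(a)
theorem range_idx_ok (n : Int) (a : List Int) (hn : n ≤ (a.length : Int)) :
    ∀ i ∈ PySem.List.pyRange 1 n 1,
      ∃ x y, PySem.List.pyGet? a i = some x ∧ PySem.List.pyGet? a (i - 1) = some y := by
  intro i hi
  rw [PySem.List.mem_pyRange_one] at hi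
  exact ⟨_, _, pyGet?_getD a i (by omega) (by omega), pyGet?_getD a (i - 1) (by omega) (by omega)⟩

-- a chain of strict steps over range(1, m) propagates to the endpoints
theorem chain_endpoints (cmp : Int → Int → Bool) (a : List Int) (m : Nat)
    (h1 : 1 ≤ m) (hm : m ≤ a.length)
    (hall : ∀ i ∈ PySem.List.pyRange 1 (m : Int) 1, bChk cmp a i = true)
    (hstep : ∀ x y : Int, cmp x y = true → y < x) :
    a.getD 0 0 ≤ a.getD (m - 1) 0 ∧ (2 ≤ m → a.getD 0 0 < a.getD (m - 1) 0) := by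
  induction m with
  | zero => omega
  | succ m ih =>
    by_cases hm1 : m = 0
    · subst hm1; simp
    · have hm1' : 1 ≤ m := by omega
      have hsplit : PySem.List.pyRange 1 ((m : Int) + 1) 1
          = PySem.List.pyRange 1 (m : Int) 1 ++ [(m : Int)] := by
        exact PySem.List.pyRange_one_succ_right (by omega)
      have hall' : ∀ i ∈ PySem.List.pyRange 1 (m : Int) 1, bChk cmp a i = true := by
        intro i hi
        apply hall
        push_cast
        rw [hsplit]
        exact List.mem_append_left _ hi
      have ihm := ih hm1' (by omega) hall'
      have hlastmem : ((m : Int)) ∈ PySem.List.pyRange 1 ((m : Int) + 1) 1 := by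
        rw [PySem.List.mem_pyRange_one]; omega
      have hlast : bChk cmp a (m : Int) = true := by
        apply hall; push_cast; exact hlastmem
      have hx := pyGet?_getD a (m : Int) (by omega) (by omega)
      have hy := pyGet?_getD a ((m : Int) - 1) (by omega) (by omega)
      rw [bChk, hx, hy] at hlast
      have hlt := hstep _ _ hlast
      have hcast1 : ((m : Int)).toNat = m := by omega
      have hcast2 : (((m : Int)) - 1).toNat = m - 1 := by omega
      rw [hcast1, hcast2] at hlt
      constructor
      · simpa using le_of_lt (lt_of_le_of_lt ihm.1 hlt)
      · intro _; simpa using lt_of_le_of_lt ihm.1 hlt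

-- the mirrored chain lemma for a strictly decreasing run
theorem chain_endpoints_rev (cmp : Int → Int → Bool) (a : List Int) (m : Nat)
    (h1 : 1 ≤ m) (hm : m ≤ a.length)
    (hall : ∀ i ∈ PySem.List.pyRange 1 (m : Int) 1, bChk cmp a i = true)
    (hstep : ∀ x y : Int, cmp x y = true → x < y) :
    a.getD (m - 1) 0 ≤ a.getD 0 0 ∧ (2 ≤ m → a.getD (m - 1) 0 < a.getD 0 0) := by
  induction m with
  | zero => omega
  | succ m ih =>
    by_cases hm1 : m = 0
    · subst hm1; simp
    · have hm1' : 1 ≤ m := by omega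
      have hsplit : PySem.List.pyRange 1 ((m : Int) + 1) 1
          = PySem.List.pyRange 1 (m : Int) 1 ++ [(m : Int)] := by
        exact PySem.List.pyRange_one_succ_right (by omega)
      have hall' : ∀ i ∈ PySem.List.pyRange 1 (m : Int) 1, bChk cmp a i = true := by
        intro i hi
        apply hall
        push_cast
        rw [hsplit]
        exact List.mem_append_left _ hi
      have ihm := ih hm1' (by omega) hall'
      have hlastmem : ((m : Int)) ∈ PySem.List.pyRange 1 ((m : Int) + 1) 1 := by
        rw [PySem.List.mem_pyRange_one]; omega
      have hlast : bChk cmp a (m : Int) = true := by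
        apply hall; push_cast; exact hlastmem
      have hx := pyGet?_getD a (m : Int) (by omega) (by omega)
      have hy := pyGet?_getD a ((m : Int) - 1) (by omega) (by omega)
      rw [bChk, hx, hy] at hlast
      have hlt := hstep _ _ hlast
      have hcast1 : ((m : Int)).toNat = m := by omega
      have hcast2 : (((m : Int)) - 1).toNat = m - 1 := by omega
      rw [hcast1, hcast2] at hlt
      constructor
      · simpa using le_of_lt (lt_of_lt_of_le hlt ihm.1)
      · intro _; simpa using lt_of_lt_of_le hlt ihm.1

-- ===== VERDICT (by name: the statement is the Claim_ definition above) =====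
theorem isStrict_spec : Claim_equal_isStrict := by
  intro n a _ hpre
  rcases hpre with ⟨hn1, hnl⟩ | ⟨hn0, hnw⟩
  case inr =>
    -- negative-index wraparound: the loop range(1, n) is empty, both sides return 'Yes'
    have hlen : 1 ≤ (a.length : Int) := by omega
    have hlast : ∃ x, PySem.List.pyGet? a (n - 1) = some x := by
      cases hx : PySem.List.pyGet? a (n - 1) with
      | some x => exact ⟨x, rfl⟩
      | none =>
        rw [PySem.List.pyGet?_eq_none_iff] at hx
        exact absurd (by unfold PySem.Raise.InRange; omega) hx
    obtain ⟨x, hx⟩ := hlast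
    have hf := pyGet?_getD a 0 (by omega) (by omega)
    unfold Spec_isStrict isStrict isStrict_alt
    rw [hx, hf, PySem.List.pyRange_one_eq_nil (by omega)]
    simp [isStrictLoop]
  unfold Spec_isStrict isStrict isStrict_alt
  have hfirst := pyGet?_getD a 0 (by omega) (by omega)
  rw [show (0 : Int).toNat = 0 from rfl] at hfirst
  have hlast := pyGet?_getD a (n - 1) (by omega) (by omega)
  rw [hfirst, hlast]
  have hok := range_idx_ok n a hnl
  rw [isStrictLoop_eq_all _ _ _ hok, isStrictLoop_eq_all _ _ _ hok, bad_le_eq, bad_ge_eq]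
  set inc := (PySem.List.pyRange 1 n 1).all (bChk (fun x y => decide (x > y)) a) with hinc
  set dec := (PySem.List.pyRange 1 n 1).all (bChk (fun x y => decide (x < y)) a) with hdec
  have hm : ((n.toNat : Int)) = n := by omega
  set F := a.getD 0 0
  set L := a.getD (n - 1).toNat 0
  have hLn : (n - 1).toNat = n.toNat - 1 := by omega
  by_cases hgt : L > F
  · simp only [hgt, if_pos]
    by_cases hi : inc = true
    · simp [hi]
    · simp only [Bool.not_eq_true] at hi
      have hd : dec = false := by
        by_contra hd'
        simp only [Bool.not_eq_false] at hd'
        rw [hdec, List.all_eq_true] at hd'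
        have := chain_endpoints_rev (fun x y => decide (x < y)) a n.toNat (by omega) (by omega)
          (by rw [hm]; exact hd') (by intro x y h; simpa using h)
        rw [← hLn] at this
        have := this.1
        omega
      simp [hi, hd]
  · simp only [hgt, if_false]
    by_cases hd : dec = true
    · simp [hd]
    · simp only [Bool.not_eq_true] at hd
      have hn2 : 2 ≤ n.toNat := by
        by_contra h2
        have : n = 1 := by omega
        subst this
        rw [hdec, PySem.List.pyRange_one_eq_nil (by omega)] at hd
        simp at hd
      have hi : inc = false := by
        by_contra hi'
        simp only [Bool.not_eq_false] at hi'
        rw [hinc, List.all_eq_true] at hi'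
        have := chain_endpoints (fun x y => decide (x > y)) a n.toNat (by omega) (by omega)
          (by rw [hm]; exact hi') (by intro x y h; simpa using h)
        rw [← hLn] at this
        have := this.2 hn2
        omega
      simp [hd, hi]
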